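-- pv_equiv track=rewrite | github.com/tychen5/NTU_ANTS-lab | RasMMA/MotifAnalysis/OriginalPython/StageMatrix.py | stageMatrix
-- ===== SOURCE A (Python) =====
-- def stageMatrix(matchMatrix, gapSeqList):
--     len_BASE = len(gapSeqList)-1
--     hkName_li = [hk for hk, stat, api in matchMatrix[1]]
--     stageMatrix = {hk:[] for hk in hkName_li}
--
--     for hk in stageMatrix:
--         strBuf_li = []
--         j = 0
--
--         while j < len_BASE+1:
--             #----GapSeqList: check if gapSeqList is empty.
--             if (gapSeqList[j]) :
--                 if (strBuf_li): stageMatrix[hk].append(strBuf_li)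
--
--                 gapli =  list(filter(lambda tup:tup[0]==hk, gapSeqList[j]))
--                 strBuf_li = gapli[0][1] if gapli else ['=']
--                 stageMatrix[hk].append(strBuf_li)
--                 strBuf_li = []
--
--             j+=1
--             if (j > len_BASE):
--                 if (strBuf_li): stageMatrix[hk].append(strBuf_li)
--                 break
--
--             #----MatchMatrix: check if the stat of two col. are equal.
--             api = [api for hkN, stat, api in matchMatrix[j] if hkN==hk][0]
--             strBuf_li.append(api)
--
--             if (j+1 < len_BASE+1):
--                 curColStat_li = [stat for hkN, stat, api in matchMatrix[j]]
--                 nextColStat_li = [stat for hkN, stat, api in matchMatrix[j+1]]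
--                 if curColStat_li != nextColStat_li:
--                     stageMatrix[hk].append(strBuf_li)
--                     strBuf_li = []
--
--     # transform multiple gap segment into one gap segment
--     for hk in stageMatrix:
--         for ii,seg in enumerate(stageMatrix[hk]):
--             if set(seg) == set(['=']):
--                 stageMatrix[hk][ii] = ['=']
--
--     return stageMatrix
-- ===== SOURCE B (Python) =====
-- def stageMatrix(matchMatrix, gapSeqList):
--     n = len(gapSeqList)
--     keys = list(dict.fromkeys(hk for hk, stat, api in matchMatrix[1]))
--
--     # per-column precomputation: first-occurrence hk->gap map, hk->api map, stat column
--     gap_maps = []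
--     for col in gapSeqList:
--         d = {}
--         for hk, seq in col:
--             d.setdefault(hk, seq)
--         gap_maps.append(d)
--     api_maps = []
--     stats = []
--     for col in matchMatrix:
--         d = {}
--         for hk, stat, api in col:
--             d.setdefault(hk, api)
--         api_maps.append(d)
--         stats.append([stat for hk, stat, api in col])
--
--     # hk-independent segmentation plan: ('gap', column) | ('api', list of columns)
--     plan = []
--     cols = []
--     for j in range(n):
--         if gapSeqList[j]:
--             if cols:
--                 plan.append(('api', cols))
--             plan.append(('gap', j))
--             cols = []
--         if j + 1 >= n:
--             if cols:
--                 plan.append(('api', cols))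
--             break
--         cols = cols + [j + 1]
--         s1 = stats[j + 1] if j + 1 < len(stats) else []
--         s2 = stats[j + 2] if j + 2 < len(stats) else []
--         if j + 2 < n and s1 != s2:
--             plan.append(('api', cols))
--             cols = []
--
--     result = {}
--     for hk in keys:
--         segs = []
--         for kind, v in plan:
--             if kind == 'gap':
--                 seg = gap_maps[v].get(hk, ['='])
--             else:
--                 seg = [api_maps[c][hk] for c in v]
--             segs.append(['='] if seg and all(x == '=' for x in seg) else seg)
--         result[hk] = segs
--     return result
-- ===== Notes on version B (the rewrite author's own statement) =====
-- stated objective: alternative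
-- what changed: Instead of re-scanning every matchMatrix/gapSeqList column with filter/list-comprehensions for each host key (and recomputing both stat columns per step), B builds per-column first-match hk->gap and hk->api dictionaries and the stat columns once, computes a single hk-independent segmentation plan, and then fills the plan per host key with O(1) lookups; B avoids A's O(H^2*L) rescans (O(H*L) instead) but a timing run's inputs have few host keys, where the two costs coincide.
import Mathlib
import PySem

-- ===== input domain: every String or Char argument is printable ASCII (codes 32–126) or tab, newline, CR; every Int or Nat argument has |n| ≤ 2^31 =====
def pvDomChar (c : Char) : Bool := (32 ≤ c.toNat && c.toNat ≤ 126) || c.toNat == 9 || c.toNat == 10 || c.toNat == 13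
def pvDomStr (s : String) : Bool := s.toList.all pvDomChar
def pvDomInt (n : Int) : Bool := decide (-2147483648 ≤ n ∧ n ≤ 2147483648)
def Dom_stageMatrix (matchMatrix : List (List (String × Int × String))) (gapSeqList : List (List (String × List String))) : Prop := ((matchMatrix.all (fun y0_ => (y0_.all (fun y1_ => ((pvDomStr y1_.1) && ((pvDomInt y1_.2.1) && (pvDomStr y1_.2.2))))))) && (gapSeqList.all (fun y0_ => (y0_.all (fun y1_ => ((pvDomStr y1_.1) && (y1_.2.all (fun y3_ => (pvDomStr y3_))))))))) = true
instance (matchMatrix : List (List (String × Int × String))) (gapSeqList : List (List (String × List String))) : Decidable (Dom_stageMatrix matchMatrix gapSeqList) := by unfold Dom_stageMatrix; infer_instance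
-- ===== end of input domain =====

-- B replaces A's per-host rescans of every column by one hk-independent segmentation
-- plan plus per-column first-match dictionaries, built once (objective: alternative).
-- Equivalence is about the RETURN value; neither program mutates its arguments.

-- ===== PORT A =====

-- [stat for hkN, stat, api in col]  (the same comprehension appears in both Pythons; shared helper)
def pvColStatsA (col : List (String × Int × String)) : List Int := col.map (fun t => t.2.1)

-- [api for hkN, stat, api in matchMatrix[j] if hkN==hk][0]
-- (Pre_ guarantees the filtered list is nonempty; the "" default is the IndexError spot)
def pvApiA (col : List (String × Int × String)) (hk : String) : String :=
  ((col.filter (fun t => t.1 == hk)).map (fun t => t.2.2)).headD ""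

-- gapli = list(filter(lambda tup: tup[0]==hk, gapSeqList[j])); gapli[0][1] if gapli else ['=']
def pvGapA (col : List (String × List String)) (hk : String) : List String :=
  match (col.filter (fun t => t.1 == hk)).head? with
  | some t => t.2
  | none => ["="]

-- A's while loop for one hk; state = (j, accumulated segments, strBuf_li).
-- fuel = n - j at every call (the loop does at most n iterations).
def pvLoopA (mm : List (List (String × Int × String))) (gs : List (List (String × List String)))
    (n : Nat) (hk : String) :
    Nat → Nat → List (List String) → List String → List (List String)
  | 0, _, segs, _ => segs
  | fuel+1, j, segs, buf =>
    if j < n then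
      -- if (gapSeqList[j]): flush strBuf_li, append the gap segment, strBuf_li = []
      let segs1 := if gs.getD j [] ≠ [] then
          (if buf ≠ [] then segs ++ [buf] else segs) ++ [pvGapA (gs.getD j []) hk]
        else segs
      let buf1 := if gs.getD j [] ≠ [] then [] else buf
      -- j += 1; if (j > len_BASE): flush; break
      if n ≤ j + 1 then
        if buf1 ≠ [] then segs1 ++ [buf1] else segs1
      else
        -- api lookup, append to strBuf_li; flush if the two stat columns differ
        let buf2 := buf1 ++ [pvApiA (mm.getD (j+1) []) hk]
        if j + 2 < n ∧ pvColStatsA (mm.getD (j+1) []) ≠ pvColStatsA (mm.getD (j+2) []) then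
          pvLoopA mm gs n hk fuel (j+1) (segs1 ++ [buf2]) []
        else
          pvLoopA mm gs n hk fuel (j+1) segs1 buf2
    else segs

-- if set(seg) == set(['=']): seg = ['=']   (set equality: the distinct elements are exactly "=")
def pvNormA (seg : List String) : List String :=
  if PySem.Set.ofList seg = ["="] then ["="] else seg

-- dict semantics: {hk: [] for hk in hkName_li} fixes the key order (first occurrences);
-- the two for-hk loops then rewrite each value in place, so the returned dict is the
-- key list paired with the per-hk loop result, post-processed segment by segment.
def stageMatrix (matchMatrix : List (List (String × Int × String))) (gapSeqList : List (List (String × List String))) : List (String × List (List String)) :=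
  let hkName_li := (matchMatrix.getD 1 []).map (fun t => t.1)  -- matchMatrix[1]; Pre_ demands 2 ≤ length
  let keys := (hkName_li.foldl (fun (d : PySem.Dict String (List (List String))) hk => d.insert hk []) PySem.Dict.empty).keys
  keys.map (fun hk =>
    (hk, (pvLoopA matchMatrix gapSeqList gapSeqList.length hk gapSeqList.length 0 [] []).map pvNormA))

-- ===== PORT B =====

-- d = {}; for hk, seq in col: d.setdefault(hk, seq)
def pvGapDictB (col : List (String × List String)) : PySem.Dict String (List String) :=
  col.foldl (fun d t => d.setdefault t.1 t.2) PySem.Dict.empty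

-- d = {}; for hk, stat, api in col: d.setdefault(hk, api)
def pvApiDictB (col : List (String × Int × String)) : PySem.Dict String String :=
  col.foldl (fun d t => d.setdefault t.1 t.2.2) PySem.Dict.empty

-- plan items: ('gap', j) | ('api', cols)
inductive PvStep where
  | gap : Nat → PvStep
  | api : List Nat → PvStep
deriving DecidableEq, Repr

-- the for j in range(n) loop with its break; fuel = n - j at every call
def pvPlanB (gs : List (List (String × List String))) (stats : List (List Int)) (n : Nat) :
    Nat → Nat → List Nat → List PvStep → List PvStep
  | 0, _, _, plan => plan
  | fuel+1, j, cols, plan =>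
    if j < n then
      -- if gapSeqList[j]: flush cols, emit the gap step, cols = []
      let plan1 := if gs.getD j [] ≠ [] then
          (if cols ≠ [] then plan ++ [PvStep.api cols] else plan) ++ [PvStep.gap j]
        else plan
      let cols1 := if gs.getD j [] ≠ [] then [] else cols
      -- if j + 1 >= n: flush; break
      if n ≤ j + 1 then
        if cols1 ≠ [] then plan1 ++ [PvStep.api cols1] else plan1
      else
        -- cols = cols + [j + 1]; flush if the two stat columns differ
        -- (s1/s2 are stats[j+1]/stats[j+2] guarded by length, Source B's conditional expressions)
        if j + 2 < n ∧ stats.getD (j+1) [] ≠ stats.getD (j+2) [] then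
          pvPlanB gs stats n fuel (j+1) [] (plan1 ++ [PvStep.api (cols1 ++ [j+1])])
        else
          pvPlanB gs stats n fuel (j+1) (cols1 ++ [j+1]) plan1
    else plan

-- ['='] if seg and all(x == '=' for x in seg) else seg
def pvNormB (seg : List String) : List String :=
  if seg ≠ [] ∧ seg.all (· == "=") then ["="] else seg

-- seg for one plan item and one hk; api_maps[c][hk] (Pre_ guarantees the key, "" is the KeyError spot)
def pvRunStepB (gapMaps : List (PySem.Dict String (List String)))
    (apiMaps : List (PySem.Dict String String)) (hk : String) : PvStep → List String
  | PvStep.gap j => (gapMaps.getD j PySem.Dict.empty).getD hk ["="]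
  | PvStep.api cs => cs.map (fun c => ((apiMaps.getD c PySem.Dict.empty).get? hk).getD "")

def stageMatrix_alt (matchMatrix : List (List (String × Int × String))) (gapSeqList : List (List (String × List String))) : List (String × List (List String)) :=
  let n := gapSeqList.length
  let keys := PySem.List.dedup ((matchMatrix.getD 1 []).map (fun t => t.1))  -- list(dict.fromkeys(...))
  let gapMaps := gapSeqList.map pvGapDictB
  let apiMaps := matchMatrix.map pvApiDictB
  let stats := matchMatrix.map pvColStatsA
  let plan := pvPlanB gapSeqList stats n n 0 [] []
  keys.map (fun hk => (hk, plan.map (fun s => pvNormB (pvRunStepB gapMaps apiMaps hk s))))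

-- ===== PRECONDITION & SPEC =====
-- Pre_ excludes exactly the inputs where Python A raises: matchMatrix shorter than 2
-- (IndexError on matchMatrix[1]), and — when there is at least one host key — any used
-- column j (1 ≤ j < len(gapSeqList)) that is out of range of matchMatrix or lacks that
-- host key (IndexError on [...][0]).
def Pre_stageMatrix (matchMatrix : List (List (String × Int × String))) (gapSeqList : List (List (String × List String))) : Prop :=
  2 ≤ matchMatrix.length ∧
  ∀ hk ∈ (matchMatrix.getD 1 []).map (fun t => t.1),
    ∀ j, j < gapSeqList.length → 1 ≤ j → hk ∈ (matchMatrix.getD j []).map (fun t => t.1)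
instance (matchMatrix : List (List (String × Int × String))) (gapSeqList : List (List (String × List String))) : Decidable (Pre_stageMatrix matchMatrix gapSeqList) := by unfold Pre_stageMatrix; infer_instance

def pvWitness_stageMatrix : (List (List (String × Int × String))) × (List (List (String × List String))) :=
  ([[("h", 0, "a")], [("h", 1, "b")]], [[], [("h", ["g"])]])

def Spec_stageMatrix (matchMatrix : List (List (String × Int × String))) (gapSeqList : List (List (String × List String))) (out : List (String × List (List String))) : Prop := out = stageMatrix_alt matchMatrix gapSeqList
instance (matchMatrix : List (List (String × Int × String))) (gapSeqList : List (List (String × List String))) (out : List (String × List (List String))) : Decidable (Spec_stageMatrix matchMatrix gapSeqList out) := by unfold Spec_stageMatrix; infer_instance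

-- ===== CLAIM (what is proved, stated in full; the proofs are below) =====
def Claim_equal_stageMatrix : Prop := ∀ (matchMatrix : List (List (String × Int × String))) (gapSeqList : List (List (String × List String))), Dom_stageMatrix matchMatrix gapSeqList → Pre_stageMatrix matchMatrix gapSeqList → Spec_stageMatrix matchMatrix gapSeqList (stageMatrix matchMatrix gapSeqList)

-- ===== LEMMAS AND PROOFS =====

-- the two normalisations agree: set(seg) == {'='} iff seg is nonempty and all '='
lemma pvNorm_eq (seg : List String) : pvNormA seg = pvNormB seg := by
  have h : (PySem.Set.ofList seg = ["="]) ↔ (seg ≠ [] ∧ seg.all (· == "=")) := by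
    constructor
    · intro he
      refine ⟨?_, ?_⟩
      · intro hnil; rw [hnil] at he; exact absurd he (by simp [PySem.Set.ofList_nil])
      · rw [List.all_eq_true]
        intro x hx
        have hmem : x ∈ PySem.Set.ofList seg := (PySem.Set.mem_ofList seg x).2 hx
        rw [he] at hmem
        simpa using hmem
    · rintro ⟨hne, hall⟩
      have hmem : ∀ x ∈ PySem.Set.ofList seg, x = "=" := by
        intro x hx
        have := (PySem.Set.mem_ofList seg x).1 hx
        simpa using (List.all_eq_true.1 hall x this)
      have hin : "=" ∈ PySem.Set.ofList seg := by
        cases seg with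
        | nil => exact absurd rfl hne
        | cons a t =>
          have ha : a = "=" := by simpa using (List.all_eq_true.1 hall a (by simp))
          exact (PySem.Set.mem_ofList (a :: t) "=").2 (by simp [ha])
      have hnd : (PySem.Set.ofList seg).Nodup := PySem.Set.nodup_ofList seg
      rcases hval : PySem.Set.ofList seg with _ | ⟨x, _ | ⟨y, t⟩⟩
      · rw [hval] at hin; exact absurd hin (by simp)
      · rw [hval] at hmem; simp [hmem x (by simp)]
      · exfalso
        rw [hval] at hmem hnd
        have hx := hmem x (by simp)
        have hy := hmem y (by simp)
        rw [List.nodup_cons] at hnd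
        exact hnd.1 (by simp [hx, hy])
  simp only [pvNormA, pvNormB]
  by_cases hc : seg ≠ [] ∧ seg.all (· == "=")
  · rw [if_pos (h.2 hc), if_pos hc]
  · rw [if_neg (fun hh => hc (h.1 hh)), if_neg hc]

-- a setdefault-fold dictionary looks up the FIRST matching pair
lemma pvSetdefaultFold_get? {α ν : Type} (key : α → String) (val : α → ν) (l : List α) (k : String) :
    (l.foldl (fun d t => d.setdefault (key t) (val t)) PySem.Dict.empty).get? k
      = ((l.filter (fun t => key t == k)).head?).map val := by
  have aux : ∀ (l : List α) (d : PySem.Dict String ν),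
      (l.foldl (fun d t => d.setdefault (key t) (val t)) d).get? k
        = (d.get? k).or (((l.filter (fun t => key t == k)).head?).map val) := by
    intro l
    induction l with
    | nil => intro d; simp
    | cons a l ih =>
      intro d
      rw [List.foldl_cons, ih]
      by_cases hk : key a == k
      · have hk' : key a = k := by simpa using hk
        rw [List.filter_cons_of_pos (by simpa using hk)]
        subst hk'
        have h1 : (d.setdefault (key a) (val a)).get? (key a) = some ((d.get? (key a)).getD (val a)) :=
          PySem.Dict.get?_setdefault_self (d := d) (k := key a) (v := val a)
        rw [h1]
        cases hd : d.get? (key a) <;> simp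
      · have hk' : k ≠ key a := fun h => hk (by simp [h])
        rw [List.filter_cons_of_neg (by simpa using hk)]
        have h1 : (d.setdefault (key a) (val a)).get? k = d.get? k := by
          by_cases hc : d.contains (key a)
          · rw [PySem.Dict.setdefault_of_contains (d := d) (k := key a) (v := val a) hc]
          · rw [PySem.Dict.setdefault_of_not_contains (d := d) (k := key a) (v := val a) (by simpa using hc)]
            exact PySem.Dict.get?_insert_of_ne (d := d) (v := val a) hk'
        rw [h1]
  rw [aux l PySem.Dict.empty]
  simp

lemma pvGapDict_lookup (col : List (String × List String)) (hk : String) :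
    (pvGapDictB col).getD hk ["="] = pvGapA col hk := by
  have h := pvSetdefaultFold_get? (fun t : String × List String => t.1) (fun t => t.2) col hk
  rw [PySem.Dict.getD_eq_get?_getD, pvGapDictB]
  rw [show (fun (d : PySem.Dict String (List String)) (t : String × List String) => d.setdefault t.1 t.2)
        = (fun d t => d.setdefault ((fun t : String × List String => t.1) t) ((fun t : String × List String => t.2) t)) from rfl, h]
  unfold pvGapA
  cases (col.filter (fun t => t.1 == hk)).head? <;> simp

lemma pvApiDict_lookup (col : List (String × Int × String)) (hk : String) :
    ((pvApiDictB col).get? hk).getD "" = pvApiA col hk := by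
  have h := pvSetdefaultFold_get? (fun t : String × Int × String => t.1) (fun t => t.2.2) col hk
  rw [pvApiDictB]
  rw [show (fun (d : PySem.Dict String String) (t : String × Int × String) => d.setdefault t.1 t.2.2)
        = (fun d t => d.setdefault ((fun t : String × Int × String => t.1) t) ((fun t : String × Int × String => t.2.2) t)) from rfl, h]
  unfold pvApiA
  cases hh : (col.filter (fun t => t.1 == hk)).head? <;>
    simp [List.headD_eq_head?_getD, List.head?_map, hh]

-- plan accumulator appends on the right
lemma pvPlanB_acc (gs : List (List (String × List String))) (stats : List (List Int)) (n : Nat) :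
    ∀ fuel j cols plan, pvPlanB gs stats n fuel j cols plan = plan ++ pvPlanB gs stats n fuel j cols [] := by
  intro fuel
  induction fuel with
  | zero => intro j cols plan; simp [pvPlanB]
  | succ fuel ih =>
    intro j cols plan
    simp only [pvPlanB]
    by_cases h1 : j < n
    · simp only [if_pos h1]
      by_cases h2 : n ≤ j + 1
      · simp only [if_pos h2]
        by_cases hg : gs[j]?.getD ([] : List (String × List String)) = [] <;> by_cases hc : cols = [] <;>
          simp [hg, hc, List.append_assoc]
      · simp only [if_neg h2]
        by_cases h3 : j + 2 < n ∧ stats.getD (j+1) [] ≠ stats.getD (j+2) []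
        · simp only [if_pos h3]
          conv_lhs => rw [ih]
          conv_rhs => rw [ih]
          by_cases hg : gs[j]?.getD ([] : List (String × List String)) = [] <;> by_cases hc : cols = [] <;>
            simp [hg, hc, List.append_assoc]
        · simp only [if_neg h3]
          conv_lhs => rw [ih]
          conv_rhs => rw [ih]
          by_cases hg : gs[j]?.getD ([] : List (String × List String)) = [] <;> by_cases hc : cols = [] <;>
            simp [hg, hc, List.append_assoc]
    · simp [h1]

-- main loop correspondence, one hk at a time
lemma pvLoop_plan (mm : List (List (String × Int × String))) (gs : List (List (String × List String))) (hk : String) :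
    ∀ fuel j segs cols,
      (pvLoopA mm gs gs.length hk fuel j segs (cols.map (fun c => pvApiA (mm.getD c []) hk))).map pvNormA
        = segs.map pvNormA
          ++ (pvPlanB gs (mm.map pvColStatsA) gs.length fuel j cols []).map
              (fun s => pvNormB (pvRunStepB (gs.map pvGapDictB) (mm.map pvApiDictB) hk s)) := by
  have hstat : ∀ i : Nat, (mm.map pvColStatsA).getD i [] = pvColStatsA (mm.getD i []) := fun i =>
    List.getD_map mm [] pvColStatsA
  have hgap : ∀ i : Nat,
      pvNormB (pvRunStepB (gs.map pvGapDictB) (mm.map pvApiDictB) hk (PvStep.gap i))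
        = pvNormA (pvGapA (gs.getD i []) hk) := by
    intro i
    have h1 : (gs.map pvGapDictB).getD i PySem.Dict.empty = pvGapDictB (gs.getD i []) :=
      List.getD_map gs [] pvGapDictB
    rw [pvRunStepB, h1, pvGapDict_lookup, pvNorm_eq]
  have hapi : ∀ cs : List Nat,
      pvNormB (pvRunStepB (gs.map pvGapDictB) (mm.map pvApiDictB) hk (PvStep.api cs))
        = pvNormA (cs.map (fun c => pvApiA (mm.getD c []) hk)) := by
    intro cs
    rw [pvRunStepB, pvNorm_eq]
    congr 1
    refine List.map_congr_left (fun c _ => ?_)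
    have h1 : (mm.map pvApiDictB).getD c PySem.Dict.empty = pvApiDictB (mm.getD c []) :=
      List.getD_map mm [] pvApiDictB
    rw [h1, pvApiDict_lookup]
  intro fuel
  induction fuel with
  | zero => intro j segs cols; simp [pvLoopA, pvPlanB]
  | succ fuel ih =>
    intro j segs cols
    simp only [pvLoopA, pvPlanB]
    by_cases h1 : j < gs.length
    · simp only [if_pos h1, hstat]
      by_cases h2 : gs.length ≤ j + 1
      · -- exit iteration: flush and break
        simp only [if_pos h2]
        by_cases hg : gs[j]?.getD ([] : List (String × List String)) = [] <;> by_cases hc : cols = [] <;>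
          simp [hg, hc, hgap, hapi, List.map_eq_nil_iff, List.append_assoc]
      · -- recursive iteration
        simp only [if_neg h2]
        by_cases h3 : j + 2 < gs.length ∧
            pvColStatsA (mm.getD (j+1) []) ≠ pvColStatsA (mm.getD (j+2) [])
        · simp only [if_pos h3]
          by_cases hg : gs[j]?.getD ([] : List (String × List String)) = [] <;> by_cases hc : cols = []
          · have h := ih (j+1) (segs ++ [[pvApiA (mm.getD (j+1) []) hk]]) []
            rw [pvPlanB_acc]
            simp [hg, hc, hgap, hapi, List.map_append, List.append_assoc] at h ⊢
            simp [h, List.append_assoc]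
          · have h := ih (j+1) (segs ++ [cols.map (fun c => pvApiA (mm.getD c []) hk)
              ++ [pvApiA (mm.getD (j+1) []) hk]]) []
            rw [pvPlanB_acc]
            simp [hg, hc, hgap, hapi, List.map_append, List.append_assoc] at h ⊢
            simp [h, List.append_assoc]
          · have h := ih (j+1) (segs ++ [pvGapA (gs.getD j []) hk]
              ++ [[pvApiA (mm.getD (j+1) []) hk]]) []
            rw [pvPlanB_acc]
            simp [hg, hc, hgap, hapi, List.map_append, List.append_assoc] at h ⊢
            simp [h, List.append_assoc]
          · have h := ih (j+1) (segs ++ [cols.map (fun c => pvApiA (mm.getD c []) hk)]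
              ++ [pvGapA (gs.getD j []) hk] ++ [[pvApiA (mm.getD (j+1) []) hk]]) []
            rw [pvPlanB_acc]
            simp [hg, hc, hgap, hapi, List.map_append, List.append_assoc] at h ⊢
            simp [h, List.append_assoc]
        · simp only [if_neg h3]
          by_cases hg : gs[j]?.getD ([] : List (String × List String)) = [] <;> by_cases hc : cols = []
          · have h := ih (j+1) segs (cols ++ [j+1])
            rw [pvPlanB_acc]
            simp [hg, hc, hgap, hapi, List.map_append, List.append_assoc] at h ⊢
            simp [h, List.append_assoc]
          · have h := ih (j+1) segs (cols ++ [j+1])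
            rw [pvPlanB_acc]
            simp [hg, hc, hgap, hapi, List.map_append, List.append_assoc] at h ⊢
            simp [h, List.append_assoc]
          · have h := ih (j+1) (segs ++ [pvGapA (gs.getD j []) hk]) [j+1]
            rw [pvPlanB_acc]
            simp [hg, hc, hgap, hapi, List.map_append, List.append_assoc] at h ⊢
            simp [h, List.append_assoc]
          · have h := ih (j+1) (segs ++ [cols.map (fun c => pvApiA (mm.getD c []) hk)]
              ++ [pvGapA (gs.getD j []) hk]) [j+1]
            rw [pvPlanB_acc]
            simp [hg, hc, hgap, hapi, List.map_append, List.append_assoc] at h ⊢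
            simp [h, List.append_assoc]
    · simp [h1]

-- ===== VERDICT (by name: the statement is the Claim_ definition above) =====
theorem stageMatrix_spec : Claim_equal_stageMatrix := by
  intro mm gs _hdom _hpre
  unfold Spec_stageMatrix
  simp only [stageMatrix, stageMatrix_alt]
  have hkeys : (((mm.getD 1 []).map (fun t => t.1)).foldl
      (fun (d : PySem.Dict String (List (List String))) hk => d.insert hk []) PySem.Dict.empty).keys
      = PySem.List.dedup ((mm.getD 1 []).map (fun t => t.1)) := by
    have h := PySem.Dict.keys_foldl_insert (l := (mm.getD 1 []).map (fun t => t.1))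
      (f := fun _ _ => ([] : List (List String))) (d := PySem.Dict.empty)
    simpa using h
  rw [hkeys]
  refine List.map_congr_left (fun hk _ => ?_)
  have hmain := pvLoop_plan mm gs hk gs.length 0 [] []
  simp only [List.map_nil, List.nil_append] at hmain
  rw [hmain]
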